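-- pv_equiv track=rewrite | github.com/zurukumo/atcoder | contests/abc227/b.py | check
-- ===== SOURCE A (Python) =====
-- def check(x):
--     for a in range(1, 1001):
--         for b in range(a, 1001):
--             s = 4 * a * b + 3 * a + 3 * b
--             if s > 1000:
--                 break
--             if x == s:
--                 return True
--     return False
-- ===== SOURCE B (Python) =====
-- def check(x):
--     # x = 4ab+3a+3b with 1 <= a <= b  iff  (4a+3) divides x-3a with b = (x-3a)//(4a+3) >= a,
--     # i.e. x >= 4a^2+6a.  A's break makes any x > 1000 unrepresentable, hence the guard.
--     if x > 1000:
--         return False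
--     a = 1
--     while 4 * a * a + 6 * a <= x:
--         if (x - 3 * a) % (4 * a + 3) == 0:
--             return True
--         a += 1
--     return False
-- ===== Notes on version B (the rewrite author's own statement) =====
-- stated objective: faster
-- what changed: Replaces the double loop over (a,b) by a single loop over a testing divisibility (4a+3) | (x-3a), computing b in closed form; the b>=a condition becomes the loop bound 4a^2+6a <= x, and an explicit x<=1000 guard mirrors A's break cap.
import Mathlib
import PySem

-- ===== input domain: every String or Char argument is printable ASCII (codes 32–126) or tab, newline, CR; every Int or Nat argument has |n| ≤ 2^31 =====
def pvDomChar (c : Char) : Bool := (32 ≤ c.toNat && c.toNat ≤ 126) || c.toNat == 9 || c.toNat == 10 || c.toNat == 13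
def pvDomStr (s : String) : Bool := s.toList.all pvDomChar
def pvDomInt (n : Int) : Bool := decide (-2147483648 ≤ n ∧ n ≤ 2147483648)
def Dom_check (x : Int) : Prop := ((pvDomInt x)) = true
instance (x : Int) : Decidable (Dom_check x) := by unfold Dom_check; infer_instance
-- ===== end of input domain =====

-- B replaces A's double loop by one loop over a, testing (4a+3) | (x-3a) (b computed in
-- closed form): ~15 divisibility tests instead of a 1000-wide double loop. A's break means x > 1000 never matches, hence B's guard.

-- ===== PORT A =====
-- inner 'for b in range(a, 1001)' with its break / return True
def checkInner (x a : Int) : List Int → Bool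
  | [] => false
  | b :: rest =>
    let s := 4 * a * b + 3 * a + 3 * b
    if s > 1000 then false
    else if x == s then true
    else checkInner x a rest

def check (x : Int) : Bool :=
  (PySem.List.pyRange 1 1001 1).any (fun a => checkInner x a (PySem.List.pyRange a 1001 1))

-- ===== PORT B =====
lemma altLoop_measure (x a : Int) (h : 4 * a * a + 6 * a ≤ x) :
    (x + 3 - (a + 1)).toNat < (x + 3 - a).toNat := by
  have h2 : a ≤ x + 2 := by nlinarith [sq_nonneg (8 * a + 5)]
  omega

def altLoop (x a : Int) : Bool :=
  if h : 4 * a * a + 6 * a ≤ x then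
    if PySem.Int.mod (x - 3 * a) (4 * a + 3) == 0 then true
    else altLoop x (a + 1)
  else false
termination_by (x + 3 - a).toNat
decreasing_by exact altLoop_measure x a h

def check_alt (x : Int) : Bool :=
  if x > 1000 then false else altLoop x 1

-- ===== PRECONDITION & SPEC =====
def Spec_check (x : Int) (out : Bool) : Prop := out = check_alt x
instance (x : Int) (out : Bool) : Decidable (Spec_check x out) := by unfold Spec_check; infer_instance

-- ===== CLAIM (what is proved, stated in full; the proofs are below) =====
def Claim_equal_check : Prop := ∀ (x : Int), Dom_check x → Spec_check x (check x)

-- ===== LEMMAS AND PROOFS =====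

lemma checkInner_iff (x a : Int) (ha : 1 ≤ a) :
    ∀ bs : List Int, bs.Pairwise (· ≤ ·) →
      (checkInner x a bs = true ↔ ∃ b ∈ bs, x = 4 * a * b + 3 * a + 3 * b ∧ x ≤ 1000) := by
  intro bs
  induction bs with
  | nil => simp [checkInner]
  | cons b0 rest ih =>
    intro hpw
    rw [List.pairwise_cons] at hpw
    obtain ⟨hle, hpw'⟩ := hpw
    by_cases hbig : 4 * a * b0 + 3 * a + 3 * b0 > 1000
    · simp only [checkInner, if_pos hbig]
      constructor
      · intro h; exact absurd h (by simp)
      · rintro ⟨b, hb, hx, hx1000⟩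
        have hb0b : b0 ≤ b := by
          rcases List.mem_cons.mp hb with h | h
          · omega
          · exact hle b h
        nlinarith [mul_nonneg (by linarith : (0:Int) ≤ 4 * a + 3) (by linarith : (0:Int) ≤ b - b0)]
    · by_cases heq : x = 4 * a * b0 + 3 * a + 3 * b0
      · simp only [checkInner, if_neg hbig, beq_iff_eq, if_pos heq]
        exact ⟨fun _ => ⟨b0, List.mem_cons_self, heq, by omega⟩, fun _ => trivial⟩
      · simp only [checkInner, if_neg hbig, beq_iff_eq, if_neg heq]
        rw [ih hpw']
        constructor
        · rintro ⟨b, hb, h⟩; exact ⟨b, List.mem_cons_of_mem _ hb, h⟩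
        · rintro ⟨b, hb, h⟩
          rcases List.mem_cons.mp hb with rfl | hmem
          · exact absurd h.1 heq
          · exact ⟨b, hmem, h⟩

lemma check_iff (x : Int) :
    check x = true ↔
      ∃ a, 1 ≤ a ∧ a ≤ 1000 ∧ ∃ b, a ≤ b ∧ b ≤ 1000 ∧
        x = 4 * a * b + 3 * a + 3 * b ∧ x ≤ 1000 := by
  unfold check
  rw [List.any_eq_true]
  constructor
  · rintro ⟨a, hamem, hinner⟩
    have hab := (PySem.List.mem_pyRange_one.mp hamem)
    have hpw : (PySem.List.pyRange a 1001 1).Pairwise (· ≤ ·) :=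
      (PySem.List.pairwise_lt_pyRange_one a 1001).imp le_of_lt
    rw [checkInner_iff x a (by omega) _ hpw] at hinner
    obtain ⟨b, hbmem, hx, hx1000⟩ := hinner
    have hbb := PySem.List.mem_pyRange_one.mp hbmem
    exact ⟨a, by omega, by omega, b, by omega, by omega, hx, hx1000⟩
  · rintro ⟨a, ha1, ha2, b, hb1, hb2, hx, hx1000⟩
    refine ⟨a, PySem.List.mem_pyRange_one.mpr ⟨by omega, by omega⟩, ?_⟩
    have hpw : (PySem.List.pyRange a 1001 1).Pairwise (· ≤ ·) :=
      (PySem.List.pairwise_lt_pyRange_one a 1001).imp le_of_lt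
    rw [checkInner_iff x a (by omega) _ hpw]
    exact ⟨b, PySem.List.mem_pyRange_one.mpr ⟨by omega, by omega⟩, hx, hx1000⟩

lemma altLoop_iff (x : Int) :
    ∀ a : Int, 1 ≤ a →
      (altLoop x a = true ↔
        ∃ a', a ≤ a' ∧ 4 * a' * a' + 6 * a' ≤ x ∧ (4 * a' + 3) ∣ (x - 3 * a')) := by
  intro a
  induction a using altLoop.induct x with
  | case1 a hcond hdvd =>
    intro _
    rw [altLoop, dif_pos hcond, if_pos hdvd]
    have hdvd' : (4 * a + 3) ∣ (x - 3 * a) :=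
      (PySem.Int.mod_eq_zero_iff_dvd _ _).mp (by simpa using hdvd)
    exact ⟨fun _ => ⟨a, le_refl a, hcond, hdvd'⟩, fun _ => rfl⟩
  | case2 a hcond hdvd ih =>
    intro ha
    rw [altLoop, dif_pos hcond, if_neg hdvd]
    rw [ih (by omega)]
    constructor
    · rintro ⟨a', h1, h2, h3⟩; exact ⟨a', by omega, h2, h3⟩
    · rintro ⟨a', h1, h2, h3⟩
      rcases eq_or_lt_of_le h1 with rfl | hlt
      · exact absurd (by simpa using (PySem.Int.mod_eq_zero_iff_dvd (x - 3 * a) (4 * a + 3)).mpr h3) hdvd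
      · exact ⟨a', by omega, h2, h3⟩
  | case3 a hcond =>
    intro ha
    rw [altLoop, dif_neg hcond]
    constructor
    · intro h; exact absurd h (by simp)
    · rintro ⟨a', h1, h2, _⟩
      rw [not_le] at hcond
      nlinarith [mul_nonneg (by linarith : (0:Int) ≤ 4 * (a' + a) + 6) (by linarith : (0:Int) ≤ a' - a)]

lemma check_alt_iff (x : Int) :
    check_alt x = true ↔
      x ≤ 1000 ∧ ∃ a, 1 ≤ a ∧ 4 * a * a + 6 * a ≤ x ∧ (4 * a + 3) ∣ (x - 3 * a) := by
  unfold check_alt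
  by_cases hx : x > 1000
  · simp only [if_pos hx]
    constructor
    · intro h; exact absurd h (by simp)
    · rintro ⟨h, _⟩; omega
  · simp only [if_neg hx]
    rw [altLoop_iff x 1 (by omega)]
    constructor
    · rintro ⟨a, h1, h2, h3⟩; exact ⟨by omega, a, h1, h2, h3⟩
    · rintro ⟨_, a, h1, h2, h3⟩; exact ⟨a, h1, h2, h3⟩

lemma check_eq_check_alt (x : Int) : check x = check_alt x := by
  rw [Bool.eq_iff_iff, check_iff, check_alt_iff]
  constructor
  · rintro ⟨a, ha1, _, b, hab, _, hx, hx1000⟩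
    refine ⟨hx1000, a, ha1, ?_, ⟨b, by linarith [hx]⟩⟩
    nlinarith [mul_nonneg (by linarith : (0:Int) ≤ 4 * a + 3) (by linarith : (0:Int) ≤ b - a)]
  · rintro ⟨hx1000, a, ha1, hcond, b, hb⟩
    have hba : a ≤ b := by
      have : (4 * a + 3) * a ≤ (4 * a + 3) * b := by nlinarith
      exact le_of_mul_le_mul_left this (by linarith)
    have ha1000 : a ≤ 1000 := by nlinarith
    have hb1000 : b ≤ 1000 := by nlinarith
    exact ⟨a, ha1, ha1000, b, hba, hb1000, by linarith, hx1000⟩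

-- ===== VERDICT (by name: the statement is the Claim_ definition above) =====
theorem check_spec : Claim_equal_check := by
  intro x _
  unfold Spec_check
  exact check_eq_check_alt x
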